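-- pv_equiv track=rewrite | github.com/mars887/avi-boost-rework | utils/batch-manager.py | render_aligned_pipe_table
-- ===== SOURCE A (Python) =====
-- from typing import Any, Dict, Iterable, List, Optional, Tuple
--
-- def render_aligned_pipe_table(rows: List[List[str]]) -> str:
--     if not rows:
--         return ""
--     col_count = max(len(r) for r in rows)
--     normalized: List[List[str]] = []
--     widths = [0] * col_count
--
--     for row in rows:
--         rr = [str(x) for x in row] + [""] * (col_count - len(row))
--         normalized.append(rr)
--         for i, cell in enumerate(rr):
--             if len(cell) > widths[i]:
--                 widths[i] = len(cell)
--
--     lines: List[str] = []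
--     for rr in normalized:
--         lines.append(" | ".join(rr[i].ljust(widths[i]) for i in range(col_count)))
--     return "\n".join(lines) + "\n"
-- ===== SOURCE B (Python) =====
-- from typing import Any, Dict, Iterable, List, Optional, Tuple
--
-- def render_aligned_pipe_table(rows: List[List[str]]) -> str:
--     if not rows:
--         return ""
--     col_count = max(len(r) for r in rows)
--     columns = [[str(r[i]) if i < len(r) else "" for r in rows] for i in range(col_count)]
--     widths = [max(len(c) for c in col) for col in columns]
--     lines = [" | ".join((str(r[i]) if i < len(r) else "").ljust(w)
--                         for i, w in enumerate(widths)) for r in rows]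
--     return "\n".join(lines) + "\n"
-- ===== Notes on version B (the rewrite author's own statement) =====
-- stated objective: alternative
-- what changed: Replaces A's single row-major pass that accumulates a normalized row list and mutates a running widths array with a column-major decomposition: build the transposed columns, take each column's max length in one reduction, and render directly from the original rows by comprehension (no normalized list, no incremental width updates).
import Mathlib
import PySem

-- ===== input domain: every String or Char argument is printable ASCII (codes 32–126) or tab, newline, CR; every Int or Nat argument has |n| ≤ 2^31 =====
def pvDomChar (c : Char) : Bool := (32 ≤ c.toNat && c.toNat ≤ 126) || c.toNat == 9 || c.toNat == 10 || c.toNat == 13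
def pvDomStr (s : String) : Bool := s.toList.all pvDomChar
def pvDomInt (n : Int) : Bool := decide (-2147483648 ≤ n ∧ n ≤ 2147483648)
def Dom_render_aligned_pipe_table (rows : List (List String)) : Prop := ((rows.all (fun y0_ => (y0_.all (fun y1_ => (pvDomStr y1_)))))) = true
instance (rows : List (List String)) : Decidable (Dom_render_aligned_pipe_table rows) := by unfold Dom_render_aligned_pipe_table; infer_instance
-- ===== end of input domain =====

-- B renders the table column-major (transpose, per-column max, then render from the
-- original rows) instead of A's row-major pass with a normalized copy and a mutated
-- widths array; objective: a genuinely different decomposition of the same O(n*m) job.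

-- s.ljust(w): pad with spaces on the right (width and length are nonneg, so Nat is exact)
def pvLjust (s : String) (w : Nat) : String :=
  String.ofList (s.toList ++ List.replicate (w - s.toList.length) ' ')

-- ===== PORT A =====
-- literal port of A; notes on exactness:
--  * str(x) on a str is the identity, ported as `fun x => x`;
--  * lengths/indices are nonnegative, so they are carried as Nat
--    (len(cell) = cell.toList.length = PySem.Str.len as a Nat);
--  * `enumerate(rr)` is `rr.zipIdx` ((cell, index) pairs, indices from 0);
--  * `rr[i]` / `widths[i]` are always in range in A (rr and widths have length
--    col_count and 0 ≤ i < col_count), so `.getD i _` is exact there.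
def render_aligned_pipe_table (rows : List (List String)) : String :=
  if rows = [] then "" else
    let colCount : Nat := (rows.map (fun r => r.length)).foldl max 0
    let st :=
      rows.foldl
        (fun (st : List (List String) × List Nat) row =>
          let rr := row.map (fun x => x) ++ List.replicate (colCount - row.length) ""
          (st.1 ++ [rr],
           rr.zipIdx.foldl
             (fun w (p : String × Nat) =>
               if p.1.toList.length > w.getD p.2 0 then w.set p.2 p.1.toList.length else w)
             st.2))
        (([] : List (List String)), List.replicate colCount 0)
    let lines := st.1.map (fun rr =>
      PySem.Str.join " | "
        ((List.range colCount).map (fun i => pvLjust (rr.getD i "") (st.2.getD i 0))))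
    PySem.Str.join "\n" lines ++ "\n"

-- ===== PORT B =====
-- literal port of Source B (same exactness notes: str(x) = x, Nat lengths,
-- `enumerate(widths)` = widths.zipIdx with (w, i) pairs used accordingly)
def render_aligned_pipe_table_alt (rows : List (List String)) : String :=
  if rows = [] then "" else
    let colCount : Nat := (rows.map (fun r => r.length)).foldl max 0
    let columns := (List.range colCount).map (fun i =>
      rows.map (fun r => if i < r.length then r.getD i "" else ""))
    let widths := columns.map (fun col => (col.map (fun c => c.toList.length)).foldl max 0)
    let lines := rows.map (fun r =>
      PySem.Str.join " | "
        (widths.zipIdx.map (fun (p : Nat × Nat) =>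
          pvLjust (if p.2 < r.length then r.getD p.2 "" else "") p.1)))
    PySem.Str.join "\n" lines ++ "\n"

-- ===== PRECONDITION & SPEC =====
def Spec_render_aligned_pipe_table (rows : List (List String)) (out : String) : Prop := out = render_aligned_pipe_table_alt rows
instance (rows : List (List String)) (out : String) : Decidable (Spec_render_aligned_pipe_table rows out) := by unfold Spec_render_aligned_pipe_table; infer_instance

-- ===== CLAIM (what is proved, stated in full; the proofs are below) =====
def Claim_equal_render_aligned_pipe_table : Prop := ∀ (rows : List (List String)), Dom_render_aligned_pipe_table rows → Spec_render_aligned_pipe_table rows (render_aligned_pipe_table rows)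

-- ===== LEMMAS AND PROOFS =====

-- the padded row that A builds
def pvPad (n : Nat) (row : List String) : List String :=
  row ++ List.replicate (n - row.length) ""

-- the cell B reads (equal to A's padded cell, proved below)
def pvCell (row : List String) (i : Nat) : String :=
  if i < row.length then row.getD i "" else ""

theorem pvPad_length {n : Nat} {row : List String} (h : row.length ≤ n) :
    (pvPad n row).length = n := by
  simp [pvPad]; omega

theorem pvPad_getD (n : Nat) (row : List String) (i : Nat) :
    (pvPad n row).getD i "" = pvCell row i := by
  unfold pvPad pvCell
  by_cases h : i < row.length
  · rw [List.getD_append _ _ _ _ h, if_pos h]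
  · rw [if_neg h]
    rcases Nat.lt_or_ge i (row.length + (n - row.length)) with h2 | h2
    · have : i - row.length < n - row.length := by omega
      simp [List.getD, List.getElem?_append_right (by omega : row.length ≤ i), this]
    · rw [List.getD_eq_default]
      simp; omega

-- A's inner enumerate loop, starting at offset pre.length
theorem pvInner_eq (rr : List String) : ∀ (pre suf : List Nat), suf.length = rr.length →
    (rr.zipIdx pre.length).foldl
      (fun w (p : String × Nat) =>
        if p.1.toList.length > w.getD p.2 0 then w.set p.2 p.1.toList.length else w)
      (pre ++ suf)
    = pre ++ List.zipWith (fun a c => max a c.toList.length) suf rr := by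
  induction rr with
  | nil => intro pre suf h; simp at h; simp [h]
  | cons c rr ih =>
    intro pre suf h
    cases suf with
    | nil => simp at h
    | cons s0 suf =>
      simp only [List.zipIdx_cons, List.foldl_cons, List.zipWith_cons_cons]
      have hget : (pre ++ s0 :: suf).getD pre.length 0 = s0 := by
        simp [List.getD]
      have hset : (pre ++ s0 :: suf).set pre.length c.toList.length
          = pre ++ c.toList.length :: suf := by
        simp
      have hlen : suf.length = rr.length := by simpa using h
      by_cases hc : c.toList.length > s0
      · rw [hget, if_pos hc, hset]
        have := ih (pre ++ [max s0 c.toList.length]) suf hlen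
        simp only [List.length_append, List.length_cons, List.length_nil] at this ⊢
        have hmax : max s0 c.toList.length = c.toList.length := by omega
        calc (rr.zipIdx (pre.length + 1)).foldl _ (pre ++ c.toList.length :: suf)
            = (rr.zipIdx (pre.length + 1)).foldl
                (fun w (p : String × Nat) =>
                  if p.1.toList.length > w.getD p.2 0 then w.set p.2 p.1.toList.length else w)
                ((pre ++ [max s0 c.toList.length]) ++ suf) := by
              rw [hmax]; simp
          _ = (pre ++ [max s0 c.toList.length])
                ++ List.zipWith (fun a c => max a c.toList.length) suf rr := by
              have h1 : (pre ++ [max s0 c.toList.length]).length = pre.length + 1 := by simp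
              rw [← h1]; exact ih _ suf hlen
          _ = pre ++ max s0 c.toList.length
                :: List.zipWith (fun a c => max a c.toList.length) suf rr := by simp
      · rw [hget, if_neg hc]
        have hmax : max s0 c.toList.length = s0 := by omega
        rw [hmax]
        calc (rr.zipIdx (pre.length + 1)).foldl _ (pre ++ s0 :: suf)
            = (rr.zipIdx (pre.length + 1)).foldl
                (fun w (p : String × Nat) =>
                  if p.1.toList.length > w.getD p.2 0 then w.set p.2 p.1.toList.length else w)
                ((pre ++ [s0]) ++ suf) := by simp
          _ = (pre ++ [s0]) ++ List.zipWith (fun a c => max a c.toList.length) suf rr := by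
              have h1 : (pre ++ [s0]).length = pre.length + 1 := by simp
              rw [← h1]; exact ih _ suf hlen
          _ = pre ++ s0 :: List.zipWith (fun a c => max a c.toList.length) suf rr := by simp

theorem pvInner_eq' (rr : List String) (w : List Nat) (h : w.length = rr.length) :
    (rr.zipIdx).foldl
      (fun w (p : String × Nat) =>
        if p.1.toList.length > w.getD p.2 0 then w.set p.2 p.1.toList.length else w)
      w
    = List.zipWith (fun a c => max a c.toList.length) w rr := by
  have := pvInner_eq rr [] w h
  simpa using this

-- the outer widths loop, elementwise
theorem pvOuter_getD (n : Nat) : ∀ (rows : List (List String)) (w : List Nat),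
    w.length = n → (∀ r ∈ rows, r.length ≤ n) → ∀ i, i < n →
    (rows.foldl (fun w row => List.zipWith (fun a c => max a c.toList.length) w (pvPad n row)) w).getD i 0
      = rows.foldl (fun a r => max a (pvCell r i).toList.length) (w.getD i 0) := by
  intro rows
  induction rows with
  | nil => intro w _ _ i _; simp
  | cons row rows ih =>
    intro w hw hlen i hi
    simp only [List.foldl_cons]
    have hplen : (pvPad n row).length = n := pvPad_length (hlen row (by simp))
    have hlen' : (List.zipWith (fun a c => max a c.toList.length) w (pvPad n row)).length = n := by
      simp [hw, hplen]
    rw [ih _ hlen' (fun r hr => hlen r (by simp [hr])) i hi]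
    congr 1
    have hi' : i < w.length := by omega
    have hi'' : i < (pvPad n row).length := by omega
    simp [List.getD, List.getElem?_zipWith, List.getElem?_eq_getElem hi',
      List.getElem?_eq_getElem hi'']
    rw [show (pvPad n row)[i] = (pvPad n row).getD i "" by
      simp [List.getD, List.getElem?_eq_getElem hi'']]
    rw [pvPad_getD]

theorem pvOuter_length (n : Nat) : ∀ (rows : List (List String)) (w : List Nat),
    w.length = n → (∀ r ∈ rows, r.length ≤ n) →
    (rows.foldl (fun w row => List.zipWith (fun a c => max a c.toList.length) w (pvPad n row)) w).length = n := by
  intro rows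
  induction rows with
  | nil => intro w hw _; simpa using hw
  | cons row rows ih =>
    intro w hw hlen
    simp only [List.foldl_cons]
    exact ih _ (by simp [hw, pvPad_length (hlen row (by simp))])
      (fun r hr => hlen r (by simp [hr]))

-- A's whole accumulating loop (normalized list + widths array) in closed form
theorem pvPairFold (n : Nat) : ∀ (rs : List (List String)) (acc : List (List String)) (w : List Nat),
    w.length = n → (∀ r ∈ rs, r.length ≤ n) →
    List.foldl
      (fun (st : List (List String) × List Nat) (row : List String) =>
        (st.1 ++ [List.map (fun x => x) row ++ List.replicate (n - row.length) ""],
         List.foldl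
           (fun w (p : String × Nat) =>
             if p.1.toList.length > w.getD p.2 0 then w.set p.2 p.1.toList.length else w)
           st.2 (List.map (fun x => x) row ++ List.replicate (n - row.length) "").zipIdx))
      (acc, w) rs
    = (acc ++ rs.map (pvPad n),
       List.foldl (fun w row => List.zipWith (fun a c => max a c.toList.length) w (pvPad n row)) w rs) := by
  intro rs
  induction rs with
  | nil => intro acc w _ _; simp
  | cons row rs ih =>
    intro acc w hw hle
    have hpad : List.map (fun x => x) row ++ List.replicate (n - row.length) "" = pvPad n row := by
      simp [pvPad]
    simp only [List.foldl_cons, hpad]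
    rw [pvInner_eq' (pvPad n row) w (by rw [hw, pvPad_length (hle row (by simp))])]
    rw [ih (acc ++ [pvPad n row]) _
      (by simp [hw, pvPad_length (hle row (by simp))])
      (fun r hr => hle r (by simp [hr]))]
    simp

-- ===== VERDICT (by name: the statement is the Claim_ definition above) =====
theorem render_aligned_pipe_table_spec : Claim_equal_render_aligned_pipe_table := by
  intro rows _
  unfold Spec_render_aligned_pipe_table render_aligned_pipe_table render_aligned_pipe_table_alt
  by_cases hrows : rows = []
  · simp [hrows]
  · rw [if_neg hrows, if_neg hrows]
    simp only []
    set n : Nat := (rows.map (fun r => r.length)).foldl max 0 with hn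
    have hle : ∀ r ∈ rows, r.length ≤ n := by
      intro r hr
      have := (PySem.List.le_foldl_max_nat (rows.map (fun r => r.length)) (fun x => x) 0).2
      simpa using this r.length (by simpa using ⟨r, hr, rfl⟩)
    rw [pvPairFold n rows [] (List.replicate n 0) (by simp) hle]
    simp only [List.nil_append]
    set wA := rows.foldl (fun w row => List.zipWith (fun a c => max a c.toList.length) w (pvPad n row))
      (List.replicate n 0) with hwA
    have hwAlen : wA.length = n := pvOuter_length n rows _ (by simp) hle
    -- B's widths list
    set wB := ((List.range n).map (fun i =>
        rows.map (fun r => if i < r.length then r.getD i "" else ""))).map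
      (fun col => (col.map (fun c => c.toList.length)).foldl max 0) with hwB
    have hwBlen : wB.length = n := by simp [hwB]
    have hcellB : ∀ (r : List String) (i : Nat),
        (if i < r.length then r.getD i "" else "") = pvCell r i := by
      intro r i; rfl
    have hwBgetD : ∀ i, i < n → wB.getD i 0
        = rows.foldl (fun a r => max a (pvCell r i).toList.length) 0 := by
      intro i hi
      have h1 : wB.getD i 0 = ((rows.map (fun r => pvCell r i)).map
          (fun c => c.toList.length)).foldl max 0 := by
        simp [hwB, List.getD, hi, pvCell]
      rw [h1, List.foldl_map, List.foldl_map]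
    have hweq : wA = wB := by
      apply List.ext_getElem (by omega)
      intro i hi hi2
      have hi' : i < n := by omega
      have h1 : wA[i] = wA.getD i 0 := by
        simp [List.getD, List.getElem?_eq_getElem hi]
      have h2 : wB[i]'hi2 = wB.getD i 0 := by
        simp [List.getD, List.getElem?_eq_getElem hi2]
      rw [h1, h2, hwBgetD i hi',
        pvOuter_getD n rows (List.replicate n 0) (by simp) hle i hi']
      simp
    -- the rendered lines agree
    have hlines : (rows.map (pvPad n)).map (fun rr =>
        PySem.Str.join " | "
          ((List.range n).map (fun i => pvLjust (rr.getD i "") (wA.getD i 0))))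
      = rows.map (fun r =>
          PySem.Str.join " | "
            (wB.zipIdx.map (fun (p : Nat × Nat) =>
              pvLjust (if p.2 < r.length then r.getD p.2 "" else "") p.1))) := by
      rw [List.map_map]
      apply List.map_congr_left
      intro r _
      simp only [Function.comp]
      congr 1
      apply List.ext_getElem (by simp [hwBlen])
      intro j hj hj'
      have hjn : j < n := by simpa using hj
      simp only [List.getElem_map, List.getElem_range, List.getElem_zipIdx]
      simp only [Nat.zero_add]
      rw [pvPad_getD n r j, hcellB r j, hweq]
      congr 1
      simp [List.getD, List.getElem?_eq_getElem (show j < wB.length by omega)]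
    rw [hlines]
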